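-- pv_equiv track=rewrite | github.com/Forcome-Database/Qbu-Crawler | qbu_crawler/server/migrations/migration_0012_report_status_columns.py | _notification_status
-- ===== SOURCE A (Python) =====
-- def _notification_status(notifications):
--     if not notifications:
--         return {"workflow_notification_status": "unknown", "delivery_last_error": None}
--     statuses = {item.get("status") for item in notifications}
--     errors = [item.get("last_error") for item in notifications if item.get("last_error")]
--     if "deadletter" in statuses:
--         return {"workflow_notification_status": "deadletter", "delivery_last_error": errors[0] if errors else None}
--     delivered = {"sent", "delivered"}
--     if statuses and statuses <= delivered:
--         return {"workflow_notification_status": "sent", "delivery_last_error": None}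
--     if statuses & delivered:
--         return {"workflow_notification_status": "partial", "delivery_last_error": errors[0] if errors else None}
--     return {"workflow_notification_status": "pending", "delivery_last_error": errors[0] if errors else None}
-- ===== SOURCE B (Python) =====
-- def _notification_status(notifications):
--     if not notifications:
--         return {"workflow_notification_status": "unknown", "delivery_last_error": None}
--     has_deadletter = False
--     has_delivered = False
--     has_non_delivered = False
--     first_error = None
--     for item in notifications:
--         status = item.get("status")
--         if status == "deadletter":
--             has_deadletter = True
--         if status in ("sent", "delivered"):
--             has_delivered = True
--         else:
--             has_non_delivered = True
--         error = item.get("last_error")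
--         if first_error is None and error:
--             first_error = error
--     if has_deadletter:
--         result = ("deadletter", first_error)
--     elif not has_non_delivered:
--         result = ("sent", None)
--     elif has_delivered:
--         result = ("partial", first_error)
--     else:
--         result = ("pending", first_error)
--     return {"workflow_notification_status": result[0], "delivery_last_error": result[1]}
-- ===== Notes on version B (the rewrite author's own statement) =====
-- stated objective: simpler
-- what changed: Replaces the statuses set, the errors list and the subset/intersection set-algebra with a single linear pass that maintains three boolean flags and the first truthy error, then branches once on the flags.
import Mathlib
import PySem

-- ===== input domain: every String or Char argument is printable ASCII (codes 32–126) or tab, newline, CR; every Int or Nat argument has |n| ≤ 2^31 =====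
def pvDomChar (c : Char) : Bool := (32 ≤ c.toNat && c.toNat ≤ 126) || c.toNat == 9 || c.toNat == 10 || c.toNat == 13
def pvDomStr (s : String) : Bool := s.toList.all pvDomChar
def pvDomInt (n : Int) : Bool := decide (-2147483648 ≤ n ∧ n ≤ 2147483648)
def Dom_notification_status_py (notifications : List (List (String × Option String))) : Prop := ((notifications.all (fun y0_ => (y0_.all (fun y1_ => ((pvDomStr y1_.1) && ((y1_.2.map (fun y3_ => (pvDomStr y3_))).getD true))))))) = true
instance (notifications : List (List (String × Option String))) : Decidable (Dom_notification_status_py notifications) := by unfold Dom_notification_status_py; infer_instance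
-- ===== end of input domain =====

-- B replaces A's statuses-set / errors-list set algebra with one linear pass keeping
-- three boolean flags and the first truthy error (objective: simpler).

-- item.get(k): first-match lookup in the association list, missing key -> None
def pvGet (item : List (String × Option String)) (k : String) : Option String :=
  ((PySem.Dict.mk item).get? k).join

-- Python truthiness of an Optional[str]: non-None and non-empty
def pvTruthy (o : Option String) : Bool :=
  match o with
  | some s => !(s == "")
  | none => false

-- ===== PORT A =====
def notification_status_py (notifications : List (List (String × Option String))) : List (String × Option String) :=
  if notifications.isEmpty then
    [("workflow_notification_status", some "unknown"), ("delivery_last_error", none)]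
  else
    let statuses : PySem.Set (Option String) :=
      PySem.Set.ofList (notifications.map (fun item => pvGet item "status"))
    let errors : List (Option String) :=
      (notifications.map (fun item => pvGet item "last_error")).filter pvTruthy
    -- 'errors[0] if errors else None' : the head element if any, else None
    let firstErr : Option String := errors.head?.join
    if PySem.Set.contains statuses (some "deadletter") then
      [("workflow_notification_status", some "deadletter"), ("delivery_last_error", firstErr)]
    else
      let delivered : PySem.Set (Option String) := PySem.Set.ofList [some "sent", some "delivered"]
      if !statuses.isEmpty && PySem.Set.issubset statuses delivered then
        [("workflow_notification_status", some "sent"), ("delivery_last_error", none)]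
      else if !(PySem.Set.inter statuses delivered).isEmpty then
        [("workflow_notification_status", some "partial"), ("delivery_last_error", firstErr)]
      else
        [("workflow_notification_status", some "pending"), ("delivery_last_error", firstErr)]

-- ===== PORT B =====
-- state: (has_deadletter, has_delivered, has_non_delivered, first_error)
def pvStepB (st : Bool × Bool × Bool × Option String) (item : List (String × Option String)) :
    Bool × Bool × Bool × Option String :=
  let status := pvGet item "status"
  let isDel := status == some "sent" || status == some "delivered"
  let error := pvGet item "last_error"
  (st.1 || (status == some "deadletter"),
   st.2.1 || isDel,
   st.2.2.1 || !isDel,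
   if st.2.2.2.isNone && pvTruthy error then error else st.2.2.2)

def notification_status_py_alt (notifications : List (List (String × Option String))) : List (String × Option String) :=
  if notifications.isEmpty then
    [("workflow_notification_status", some "unknown"), ("delivery_last_error", none)]
  else
    let st := notifications.foldl pvStepB (false, false, false, none)
    let result : String × Option String :=
      if st.1 then ("deadletter", st.2.2.2)
      else if !st.2.2.1 then ("sent", none)
      else if st.2.1 then ("partial", st.2.2.2)
      else ("pending", st.2.2.2)
    [("workflow_notification_status", some result.1), ("delivery_last_error", result.2)]

-- ===== PRECONDITION & SPEC =====
def Spec_notification_status_py (notifications : List (List (String × Option String))) (out : List (String × Option String)) : Prop := out = notification_status_py_alt notifications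
instance (notifications : List (List (String × Option String))) (out : List (String × Option String)) : Decidable (Spec_notification_status_py notifications out) := by unfold Spec_notification_status_py; infer_instance

-- ===== CLAIM (what is proved, stated in full; the proofs are below) =====
def Claim_equal_notification_status_py : Prop := ∀ (notifications : List (List (String × Option String))), Dom_notification_status_py notifications → Spec_notification_status_py notifications (notification_status_py notifications)

-- ===== LEMMAS AND PROOFS =====

def pvIsDead (item : List (String × Option String)) : Bool := pvGet item "status" == some "deadletter"
def pvIsDel (item : List (String × Option String)) : Bool :=
  pvGet item "status" == some "sent" || pvGet item "status" == some "delivered"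
def pvFirstErr (m : List (List (String × Option String))) : Option String :=
  ((m.map (fun item => pvGet item "last_error")).filter pvTruthy).head?.join

-- characterization of B's fold
theorem pvFoldB_char (m : List (List (String × Option String))) (st : Bool × Bool × Bool × Option String) :
    m.foldl pvStepB st =
      (st.1 || m.any pvIsDead,
       st.2.1 || m.any pvIsDel,
       st.2.2.1 || m.any (fun it => !pvIsDel it),
       if st.2.2.2.isSome then st.2.2.2 else pvFirstErr m) := by
  induction m generalizing st with
  | nil =>
    obtain ⟨d, del, oth, fe⟩ := st
    cases fe <;> simp [pvFirstErr]
  | cons x l ih =>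
    rw [List.foldl_cons, ih]
    obtain ⟨d, del, oth, fe⟩ := st
    simp only [pvStepB, pvIsDead, pvIsDel, pvFirstErr, List.any_cons, List.map_cons]
    refine Prod.ext (by simp [Bool.or_assoc]) (Prod.ext (by simp [Bool.or_assoc]) (Prod.ext (by simp [Bool.or_assoc]) ?_))
    cases fe with
    | some s => simp
    | none =>
      by_cases ht : pvTruthy (pvGet x "last_error") = true
      · cases he : pvGet x "last_error" with
        | none => simp [he, pvTruthy] at ht
        | some s => simp [he ▸ ht]
      · simp [ht]

theorem pvDead_char (m : List (List (String × Option String))) :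
    PySem.Set.contains (PySem.Set.ofList (m.map (fun item => pvGet item "status"))) (some "deadletter")
      = m.any pvIsDead := by
  rw [Bool.eq_iff_iff, PySem.Set.contains_iff, PySem.Set.mem_ofList, List.any_eq_true]
  simp only [List.mem_map, pvIsDead, beq_iff_eq]

theorem pvSubset_char (m : List (List (String × Option String))) (h : m ≠ []) :
    (!(PySem.Set.ofList (m.map (fun item => pvGet item "status"))).isEmpty
       && PySem.Set.issubset (PySem.Set.ofList (m.map (fun item => pvGet item "status")))
            (PySem.Set.ofList [some "sent", some "delivered"]))
      = !(m.any (fun it => !pvIsDel it)) := by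
  obtain ⟨x, l, rfl⟩ := List.exists_cons_of_ne_nil h
  have hne : PySem.Set.ofList ((x :: l).map (fun item => pvGet item "status")) ≠ [] := by
    rw [List.map_cons, PySem.Set.ofList_cons]; simp
  rw [Bool.eq_iff_iff]
  simp only [Bool.and_eq_true, Bool.not_eq_true', List.isEmpty_eq_false_iff,
    List.any_eq_false, Bool.not_eq_false, PySem.Set.issubset_iff]
  constructor
  · rintro ⟨-, hsub⟩ it hit
    have hm := hsub (pvGet it "status") (by rw [PySem.Set.mem_ofList]; exact List.mem_map_of_mem hit)
    rw [PySem.Set.mem_ofList] at hm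
    simp only [List.mem_cons, List.not_mem_nil, or_false] at hm
    rcases hm with h1 | h1 <;> simp [pvIsDel, h1]
  · intro hall
    refine ⟨hne, ?_⟩
    intro s hs
    rw [PySem.Set.mem_ofList] at hs
    obtain ⟨it, hit, rfl⟩ := List.mem_map.mp hs
    have := hall it hit
    simp only [pvIsDel, Bool.or_eq_true, beq_iff_eq] at this
    rw [PySem.Set.mem_ofList]
    rcases this with h1 | h1 <;> simp [h1]

theorem pvInter_char (m : List (List (String × Option String))) :
    (!(PySem.Set.inter (PySem.Set.ofList (m.map (fun item => pvGet item "status")))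
        (PySem.Set.ofList [some "sent", some "delivered"])).isEmpty)
      = m.any pvIsDel := by
  rw [Bool.eq_iff_iff]
  rw [Bool.not_eq_true', List.isEmpty_eq_false_iff, ← List.isEmpty_eq_false_iff,
    List.isEmpty_eq_false_iff_exists_mem]
  constructor
  · rintro ⟨s, hs⟩
    rw [PySem.Set.mem_inter, PySem.Set.mem_ofList, PySem.Set.mem_ofList] at hs
    obtain ⟨hs1, hs2⟩ := hs
    obtain ⟨it, hit, rfl⟩ := List.mem_map.mp hs1
    rw [List.any_eq_true]
    refine ⟨it, hit, ?_⟩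
    simp only [List.mem_cons, List.not_mem_nil, or_false] at hs2
    rcases hs2 with h1 | h1 <;> simp [pvIsDel, h1]
  · intro h
    obtain ⟨it, hit, hdel⟩ := List.any_eq_true.mp h
    refine ⟨pvGet it "status", ?_⟩
    rw [PySem.Set.mem_inter, PySem.Set.mem_ofList, PySem.Set.mem_ofList]
    refine ⟨List.mem_map.mpr ⟨it, hit, rfl⟩, ?_⟩
    simp only [pvIsDel, Bool.or_eq_true, beq_iff_eq] at hdel
    rcases hdel with h1 | h1 <;> simp [h1]

-- ===== VERDICT (by name: the statement is the Claim_ definition above) =====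
theorem notification_status_py_spec : Claim_equal_notification_status_py := by
  intro m _
  unfold Spec_notification_status_py notification_status_py notification_status_py_alt
  by_cases hm : m.isEmpty
  · simp [hm]
  · have hne : m ≠ [] := by simpa [List.isEmpty_iff] using hm
    simp only [hm, if_false, Bool.false_eq_true]
    rw [pvFoldB_char, pvDead_char, pvSubset_char m hne, pvInter_char]
    simp only [Bool.false_or, Option.isSome_none, Bool.false_eq_true, if_false]
    split_ifs <;> rfl
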